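-- pv_equiv track=rewrite | github.com/jeppeter/py-obcode | src/strparser.py | get_bit
-- ===== SOURCE A (Python) =====
-- def get_bits(num):
--     bits = 0
--     fnum = num
--     while fnum > 0:
--         if fnum & 1:
--             bits += 1
--         fnum >>= 1
--     return bits
--
-- def get_bit(num, nbit):
--     num = num & 0xff
--     bits = get_bits(num)
--     if bits == 0:
--         return 0
--     needbit = (nbit % bits)
--     needbit += 1
--     cnum = 1
--     fnum = num
--     curbit = 0
--     while curbit < needbit:
--         if fnum & cnum:
--             curbit += 1
--             if curbit == needbit:
--                 return cnum
--         cnum <<= 1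
--     return fnum
-- ===== SOURCE B (Python) =====
-- def _set_bit_vals(m):
--     # values 1<<i for every set bit of m, low to high, over the 8 masked bit positions
--     return [1 << i for i in range(8) if (m >> i) & 1]
--
-- def get_bit(num, nbit):
--     m = num & 0xff
--     vals = _set_bit_vals(m)
--     if not vals:
--         return 0
--     return vals[nbit % len(vals)]
-- ===== Notes on version B (the rewrite author's own statement) =====
-- stated objective: simpler
-- what changed: Replaces the count-bits-then-rescan-with-a-counter two-phase loop logic by a single pass that materializes the list of set-bit values and indexes it with nbit modulo its length.
import Mathlib
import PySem

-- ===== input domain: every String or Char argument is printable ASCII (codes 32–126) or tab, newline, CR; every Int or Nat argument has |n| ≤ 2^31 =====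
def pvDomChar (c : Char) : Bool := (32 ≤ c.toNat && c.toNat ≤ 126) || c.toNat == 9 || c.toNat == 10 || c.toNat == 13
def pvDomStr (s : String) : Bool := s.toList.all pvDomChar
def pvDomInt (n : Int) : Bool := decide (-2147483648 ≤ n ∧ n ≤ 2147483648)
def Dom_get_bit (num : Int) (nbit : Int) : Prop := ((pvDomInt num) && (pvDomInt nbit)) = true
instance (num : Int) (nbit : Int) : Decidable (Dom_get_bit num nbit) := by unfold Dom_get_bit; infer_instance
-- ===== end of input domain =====

-- B replaces A's count-bits-then-rescan two-phase loops by one pass that materializes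
-- the list of set-bit values and indexes it with nbit mod its length (objective: simpler).


-- ===== PORT A =====
-- while fnum > 0: loop of get_bits; the fuel is the iteration count bound num.toNat
-- (fnum halves each step, so bitlength(num) ≤ num.toNat iterations happen); structural so the kernel evaluates it
def get_bits_go : Nat → Int → Int → Int
  | 0, _, bits => bits
  | fuel + 1, fnum, bits =>
    if fnum > 0 then
      get_bits_go fuel (fnum >>> 1) (if PySem.Int.band fnum 1 ≠ 0 then bits + 1 else bits)
    else bits

def get_bits (num : Int) : Int := get_bits_go num.toNat num 0

-- while curbit < needbit: scan of get_bit; fuel 8 covers the 8 masked bit positions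
-- (when called, needbit ≤ popcount(fnum) with fnum < 256, so the loop returns within 8 iterations;
-- the fuel-0 result fnum is the Python loop's own fall-through 'return fnum')
def get_bit_go (fnum needbit : Int) : Nat → Int → Int → Int
  | 0, _, _ => fnum
  | fuel + 1, cnum, curbit =>
    if curbit < needbit then
      if PySem.Int.band fnum cnum ≠ 0 then
        if curbit + 1 = needbit then cnum
        else get_bit_go fnum needbit fuel (cnum <<< 1) (curbit + 1)
      else get_bit_go fnum needbit fuel (cnum <<< 1) curbit
    else fnum

def get_bit (num : Int) (nbit : Int) : Int :=
  let num := PySem.Int.band num 0xff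
  let bits := get_bits num
  if bits = 0 then 0
  else
    let needbit := PySem.Int.mod nbit bits + 1
    get_bit_go num needbit 8 1 0

-- ===== PORT B =====
-- helper _set_bit_vals of Source B: [1 << i for i in range(8) if (m >> i) & 1]
def set_bit_vals (m : Int) : List Int :=
  (List.range 8).filterMap fun i =>
    if PySem.Int.band (m >>> i) 1 ≠ 0 then some ((1 : Int) <<< i) else none

def get_bit_alt (num : Int) (nbit : Int) : Int :=
  let m := PySem.Int.band num 0xff
  let vals := set_bit_vals m
  if vals = [] then 0
  else (PySem.List.pyGet? vals (PySem.Int.mod nbit (vals.length : Int))).getD 0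
  -- the index nbit % len(vals) is in range, so Python's vals[...] never raises; .getD 0 only discharges the option

-- ===== PRECONDITION & SPEC =====
def Spec_get_bit (num : Int) (nbit : Int) (out : Int) : Prop := out = get_bit_alt num nbit
instance (num : Int) (nbit : Int) (out : Int) : Decidable (Spec_get_bit num nbit out) := by unfold Spec_get_bit; infer_instance

-- ===== CLAIM (what is proved, stated in full; the proofs are below) =====
def Claim_equal_get_bit : Prop := ∀ (num : Int) (nbit : Int), Dom_get_bit num nbit → Spec_get_bit num nbit (get_bit num nbit)

-- ===== LEMMAS AND PROOFS =====

theorem band255_bounds (num : Int) : 0 ≤ PySem.Int.band num 255 ∧ PySem.Int.band num 255 < 256 := by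
  unfold PySem.Int.band
  split_ifs with h1 h2
  · have := Nat.and_le_right (n := num.toNat) (m := (255 : Int).toNat)
    constructor
    · exact_mod_cast Nat.zero_le _
    · have h255 : ((255 : Int).toNat) = 255 := rfl
      omega
  · omega
  · have hle : (255 : Int).toNat &&& (-num - 1).toNat ≤ (255 : Int).toNat := Nat.and_le_left
    have h255 : ((255 : Int).toNat) = 255 := rfl
    omega
  · omega

set_option maxRecDepth 8192 in
theorem len_vals_eq : ∀ m : Nat, m < 256 → get_bits (m : Int) = ((set_bit_vals (m : Int)).length : Int) := by decide

set_option maxRecDepth 8192 in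
theorem scan_eq : ∀ m : Nat, m < 256 → ∀ r : Nat, r < 8 → r < (set_bit_vals (m : Int)).length →
    get_bit_go (m : Int) ((r : Int) + 1) 8 1 0 = (set_bit_vals (m : Int)).getD r 0 := by decide

theorem len_vals_le (m : Int) : (set_bit_vals m).length ≤ 8 := by
  have h := List.length_filterMap_le
    (fun i => if PySem.Int.band (m >>> i) 1 ≠ 0 then some ((1 : Int) <<< i) else none) (List.range 8)
  simpa [set_bit_vals] using h

-- ===== VERDICT (by name: the statement is the Claim_ definition above) =====
theorem get_bit_spec : Claim_equal_get_bit := by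
  intro num nbit _
  unfold Spec_get_bit get_bit get_bit_alt
  obtain ⟨h0, hlt⟩ := band255_bounds num
  set m : Int := PySem.Int.band num 0xff with hmdef
  have hmn : ((m.toNat : Nat) : Int) = m := Int.toNat_of_nonneg h0
  have hmlt : m.toNat < 256 := by omega
  have hlen := len_vals_eq m.toNat hmlt
  rw [hmn] at hlen
  by_cases hz : (set_bit_vals m).length = 0
  · have hnil : set_bit_vals m = [] := List.length_eq_zero_iff.mp hz
    simp [hlen, hnil]
  · have hbits : (0 : Int) < get_bits m := by rw [hlen]; exact_mod_cast Nat.pos_of_ne_zero hz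
    have hnnil : set_bit_vals m ≠ [] := fun h => hz (by simp [h])
    rw [if_neg (by omega), if_neg hnnil]
    set r : Int := PySem.Int.mod nbit (get_bits m) with hrdef
    have hr0 : 0 ≤ r := PySem.Int.mod_nonneg _ hbits
    have hrlt : r < get_bits m := PySem.Int.mod_lt _ hbits
    have hrn : ((r.toNat : Nat) : Int) = r := Int.toNat_of_nonneg hr0
    have hrlen : r.toNat < (set_bit_vals m).length := by omega
    have hr8 : r.toNat < 8 := lt_of_lt_of_le hrlen (len_vals_le m)
    have hA := scan_eq m.toNat hmlt r.toNat hr8 (by rwa [hmn])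
    rw [hmn, hrn] at hA
    have hB : PySem.List.pyGet? (set_bit_vals m) (PySem.Int.mod nbit ((set_bit_vals m).length : Int)) =
        some ((set_bit_vals m)[r.toNat]) := by
      rw [← hlen, ← hrdef]
      exact PySem.List.pyGet?_eq_some_getElem _ hr0 (by rw [← hlen]; exact hrlt)
    rw [hA, hB]
    simp [List.getElem?_eq_getElem hrlen]
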